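-- pv_equiv track=rewrite | github.com/dhiraj9087/CP | codechef/maximinilbe.py | count_special_subsets
-- ===== SOURCE A (Python) =====
-- def count_special_subsets(n, arr):
--     count = [0] * (n + 2)  # Count array to store frequency of differences
--     result = 0
--
--     for num in arr:
--         if 1 <= num <= n:
--             count[num] += 1
--
--     for i in range(1, n + 1):
--         if count[i] > 0:
--             result += count[i] * count[i + 1]
--
--     return result
-- ===== SOURCE B (Python) =====
-- def count_special_subsets(n, arr):
--     # Sort the in-range values, then a single scan over the runs of equal
--     # values: each element pairs with every occurrence of its predecessor
--     # value, which (by sortedness) has all been seen already.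
--     vals = sorted(x for x in arr if 1 <= x <= n)
--     result = 0
--     cur_val = None
--     cur_len = 0
--     prev_len = 0
--     for v in vals:
--         if v == cur_val:
--             cur_len += 1
--             result += prev_len
--         elif cur_val is not None and v == cur_val + 1:
--             prev_len = cur_len
--             cur_len = 1
--             result += prev_len
--         else:
--             prev_len = 0
--             cur_len = 1
--         cur_val = v
--     return result
-- ===== Notes on version B (the rewrite author's own statement) =====
-- stated objective: alternative
-- what changed: B sorts the in-range values and does a single run-length scan over the sorted list, adding for each element the length of the preceding value's run (no counter table and no products), instead of A's frequency array plus a full product-sum scan over range(1,n+1).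
import Mathlib
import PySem

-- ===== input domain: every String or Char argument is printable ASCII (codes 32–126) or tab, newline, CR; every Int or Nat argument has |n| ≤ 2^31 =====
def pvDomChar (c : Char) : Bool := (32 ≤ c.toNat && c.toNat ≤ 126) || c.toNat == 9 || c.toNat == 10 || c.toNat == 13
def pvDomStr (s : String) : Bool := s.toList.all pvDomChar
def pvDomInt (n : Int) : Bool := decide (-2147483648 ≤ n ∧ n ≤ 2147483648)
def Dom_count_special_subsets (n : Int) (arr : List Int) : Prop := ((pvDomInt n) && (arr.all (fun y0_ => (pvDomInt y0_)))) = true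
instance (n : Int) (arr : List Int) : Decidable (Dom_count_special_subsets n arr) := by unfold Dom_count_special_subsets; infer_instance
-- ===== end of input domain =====

-- B sorts the in-range values and does a single run-length scan, adding for each
-- element the length of the preceding value's run, instead of A's frequency array
-- plus a product-sum scan over range(1,n+1) (alternative algorithm; same result).

-- ===== PORT A =====
def count_special_subsets (n : Int) (arr : List Int) : Int :=
  -- count = [0] * (n + 2)  (Python's list-repeat with a negative factor is [])
  let count0 : List Int := List.replicate (n + 2).toNat 0
  let count := arr.foldl (fun c num =>
    if 1 ≤ num ∧ num ≤ n then PySem.List.pySetD c num (PySem.List.pyGetD c num 0 + 1) else c) count0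
  (PySem.List.pyRange 1 (n + 1) 1).foldl (fun result i =>
    if 0 < PySem.List.pyGetD count i 0 then
      result + PySem.List.pyGetD count i 0 * PySem.List.pyGetD count (i + 1) 0
    else result) 0

-- ===== PORT B =====
-- one loop iteration: state (cur_val, cur_len, prev_len, result)
def pvBStep (st : Option Int × Int × Int × Int) (v : Int) : Option Int × Int × Int × Int :=
  match st with
  | (cv, cl, pl, acc) =>
    if cv = some v then (some v, cl + 1, pl, acc + pl)
    else if cv = some (v - 1) then (some v, 1, cl, acc + cl)
    else (some v, 1, 0, acc)

def count_special_subsets_alt (n : Int) (arr : List Int) : Int :=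
  let vals := PySem.List.sorted (arr.filter (fun x => decide (1 ≤ x ∧ x ≤ n))) (fun x => x) false
  (vals.foldl pvBStep (none, 0, 0, 0)).2.2.2

-- ===== PRECONDITION & SPEC =====
def Spec_count_special_subsets (n : Int) (arr : List Int) (out : Int) : Prop := out = count_special_subsets_alt n arr
instance (n : Int) (arr : List Int) (out : Int) : Decidable (Spec_count_special_subsets n arr out) := by unfold Spec_count_special_subsets; infer_instance

-- ===== CLAIM (what is proved, stated in full; the proofs are below) =====
def Claim_equal_count_special_subsets : Prop := ∀ (n : Int) (arr : List Int), Dom_count_special_subsets n arr → Spec_count_special_subsets n arr (count_special_subsets n arr)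

-- ===== LEMMAS AND PROOFS =====

-- a guarded fold is the fold over the filtered list
theorem pvFoldlIteFilter {α β : Type} (p : α → Prop) [DecidablePred p] (f : β → α → β) :
    ∀ (l : List α) (b : β),
      l.foldl (fun c x => if p x then f c x else c) b
        = (l.filter (fun x => decide (p x))).foldl f b := by
  intro l
  induction l with
  | nil => intro b; rfl
  | cons x l ih =>
    intro b
    by_cases hx : p x <;> simp [List.foldl, hx, ih]

-- invariant of A's counting loop: pointwise equals old entry + occurrence count
theorem pvFoldAGetD (n : Int) :
    ∀ (l : List Int) (c : List Int),
      (∀ x ∈ l, 1 ≤ x ∧ x ≤ n) → c.length = (n + 2).toNat →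
      ∀ i : Nat,
        (l.foldl (fun c num => PySem.List.pySetD c num (PySem.List.pyGetD c num 0 + 1)) c).getD i 0
          = c.getD i 0 + (l.count (i : Int) : Int) := by
  intro l
  induction l with
  | nil => intro c _ _ i; simp
  | cons x l ih =>
    intro c hmem hlen i
    have hx : 1 ≤ x ∧ x ≤ n := hmem x (by simp)
    have hx0 : (0 : Int) ≤ x := by omega
    have hset : PySem.List.pySetD c x (PySem.List.pyGetD c x 0 + 1)
        = c.set x.toNat (c.getD x.toNat 0 + 1) := by
      rw [PySem.List.pySetD_of_nonneg c _ hx0, PySem.List.pyGetD_of_nonneg c 0 hx0]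
    have hlt : x.toNat < c.length := by omega
    simp only [List.foldl_cons, hset]
    rw [ih _ (fun y hy => hmem y (by simp [hy])) (by simpa using hlen) i]
    by_cases hix : i = x.toNat
    · subst hix
      have hxi : ((x.toNat : Nat) : Int) = x := by omega
      rw [hxi, List.count_cons_self]
      simp [List.getD_eq_getElem?_getD, hlt]
      ring
    · have hne : (i : Int) ≠ x := by omega
      have hne' : x.toNat ≠ i := fun h => hix h.symm
      rw [List.count_cons_of_ne (by omega)]
      simp [List.getD_eq_getElem?_getD, List.getElem?_set_ne hne']

theorem pvGetDReplicate (k i : Nat) : (List.replicate k (0 : Int)).getD i 0 = 0 := by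
  simp [List.getD_eq_getElem?_getD, List.getElem?_replicate]
  split_ifs <;> simp

-- A's result is the product-sum over the range, in terms of counts of the filtered list
theorem pvAEqSum (n : Int) (arr : List Int) :
    count_special_subsets n arr
      = ((PySem.List.pyRange 1 (n + 1) 1).map
          (fun i => ((arr.filter (fun x => decide (1 ≤ x ∧ x ≤ n))).count i : Int)
            * ((arr.filter (fun x => decide (1 ≤ x ∧ x ≤ n))).count (i + 1) : Int))).sum := by
  unfold count_special_subsets
  simp only []
  rw [pvFoldlIteFilter (fun num : Int => 1 ≤ num ∧ num ≤ n)
       (fun (c : List Int) num => PySem.List.pySetD c num (PySem.List.pyGetD c num 0 + 1)) arr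
       (List.replicate (n + 2).toNat 0)]
  set F : List Int := arr.filter (fun x => decide (1 ≤ x ∧ x ≤ n)) with hF
  have hmemF : ∀ x ∈ F, 1 ≤ x ∧ x ≤ n := by
    intro x hx
    have := List.of_mem_filter hx
    simpa using this
  set C : List Int :=
    F.foldl (fun c num => PySem.List.pySetD c num (PySem.List.pyGetD c num 0 + 1))
      (List.replicate (n + 2).toNat 0) with hC
  have hA : ∀ i : Int, 0 ≤ i → PySem.List.pyGetD C i 0 = (F.count i : Int) := by
    intro i hi
    rw [hC, PySem.List.pyGetD_of_nonneg _ 0 hi,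
        pvFoldAGetD n F (List.replicate (n + 2).toNat 0) hmemF (by simp) i.toNat,
        pvGetDReplicate]
    have h' : ((i.toNat : Nat) : Int) = i := by omega
    rw [h']; ring
  have hcongrA : ∀ acc : Int, ∀ i ∈ PySem.List.pyRange 1 (n + 1) 1,
      (if 0 < PySem.List.pyGetD C i 0 then
        acc + PySem.List.pyGetD C i 0 * PySem.List.pyGetD C (i + 1) 0
      else acc)
      = acc + (F.count i : Int) * (F.count (i + 1) : Int) := by
    intro acc i hi
    have hi' : 1 ≤ i ∧ i < n + 1 := PySem.List.mem_pyRange_one.mp hi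
    rw [hA i (by omega), hA (i + 1) (by omega)]
    by_cases hp : (0 : Int) < (F.count i : Int)
    · rw [if_pos hp]
    · have h0 : (F.count i : Int) = 0 := by omega
      rw [if_neg hp, h0]
      ring
  rw [PySem.List.foldl_congr_mem _ _ _ _ hcongrA, PySem.List.foldl_add, zero_add]

-- in a nondecreasing list, every element is at most the last one
theorem pvLastMax (p : List Int) (m : Int) (hpl : p.getLast? = some m)
    (hp : p.Pairwise (· ≤ ·)) : ∀ x ∈ p, x ≤ m := by
  obtain ⟨q, rfl⟩ := List.getLast?_eq_some_iff.mp hpl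
  intro x hx
  rcases List.mem_append.mp hx with h | h
  · exact (List.pairwise_append.mp hp).2.2 x h m (by simp)
  · simp at h; omega

-- what B's loop computes on a nondecreasing nonempty list: final state of the run scan
theorem pvBFold (l : List Int) (hl : l.Pairwise (· ≤ ·)) :
    ∀ m : Int, l.getLast? = some m →
      l.foldl pvBStep (none, 0, 0, 0)
        = (some m, (l.count m : Int), (l.count (m - 1) : Int),
            (l.map (fun v => (l.count (v - 1) : Int))).sum) := by
  induction l using List.reverseRecOn with
  | nil => intro m hm; exact absurd hm (by simp)
  | append_singleton p v ih =>
    intro m hm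
    have hlast : (p ++ [v]).getLast? = some v := by simp
    have hmv0 : m = v := by
      rw [hlast] at hm
      injection hm with h
      omega
    subst hmv0
    have hp : p.Pairwise (· ≤ ·) := (List.pairwise_append.mp hl).1
    have hle : ∀ x ∈ p, x ≤ m := by
      intro x hx
      exact (List.pairwise_append.mp hl).2.2 x hx m (by simp)
    have hcount : ∀ x : Int, (p ++ [m]).count x = p.count x + if m = x then 1 else 0 := by
      intro x
      rw [List.count_append]
      by_cases h : m = x
      · subst h; simp
      · rw [if_neg h]
        simp [List.count_cons, List.count_nil]
        exact h
    have hmapc : (p ++ [m]).map (fun w => (((p ++ [m]).count (w - 1) : Nat) : Int))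
        = (p ++ [m]).map (fun w => ((p.count (w - 1) : Nat) : Int)) := by
      apply List.map_congr_left
      intro w hw
      have hwle : w ≤ m := by
        rcases List.mem_append.mp hw with h | h
        · exact hle w h
        · simp at h; omega
      rw [hcount (w - 1), if_neg (by omega)]
      simp
    rw [List.foldl_append, hmapc, List.map_append, List.sum_append, List.map_singleton,
        List.sum_singleton, hcount m, hcount (m - 1), if_pos rfl,
        if_neg (show ¬ m = m - 1 by omega)]
    rcases hpl : p.getLast? with _ | m'
    · have hpe : p = [] := List.getLast?_eq_none_iff.mp hpl
      subst hpe
      show pvBStep (none, 0, 0, 0) m = _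
      show ((some m, 1, 0, 0) : Option Int × Int × Int × Int) = _
      simp only [List.count_nil, List.map_nil, List.sum_nil, Prod.mk.injEq]
      norm_num
    · have hmax : ∀ x ∈ p, x ≤ m' := pvLastMax p m' hpl hp
      have hm'm : m' ≤ m := hle m' (List.mem_of_getLast? hpl)
      rw [ih hp m' hpl]
      simp only [List.foldl_cons, List.foldl_nil]
      generalize (p.map (fun w => ((p.count (w - 1) : Nat) : Int))).sum = S
      simp only [pvBStep]
      split_ifs with ha hb
      · have hmv' : m' = m := by injection ha
        subst hmv'
        simp only [Prod.mk.injEq]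
        refine ⟨trivial, ?_, ?_, ?_⟩ <;> push_cast <;> omega
      · have hmv' : m' = m - 1 := by injection hb
        subst hmv'
        have hcv : p.count m = 0 :=
          List.count_eq_zero.mpr (fun hmem => by have := hmax m hmem; omega)
        simp only [Prod.mk.injEq]
        refine ⟨trivial, ?_, ?_, ?_⟩ <;> push_cast [hcv] <;> omega
      · have hane : m' ≠ m := fun h => ha (by rw [h])
        have hbne : m' ≠ m - 1 := fun h => hb (by rw [h])
        have hcv : p.count m = 0 :=
          List.count_eq_zero.mpr (fun hmem => by have := hmax m hmem; omega)
        have hcv1 : p.count (m - 1) = 0 :=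
          List.count_eq_zero.mpr (fun hmem => by have := hmax _ hmem; omega)
        simp only [Prod.mk.injEq]
        refine ⟨trivial, ?_, ?_, ?_⟩ <;> push_cast [hcv, hcv1] <;> omega

-- sums of one function over two finsets agree when it vanishes off the intersection
theorem pvSumEqOfVanish (S T : Finset Int) (h : Int → Int)
    (hS : ∀ i ∈ S, i ∉ T → h i = 0) (hT : ∀ i ∈ T, i ∉ S → h i = 0) :
    (∑ i ∈ S, h i) = ∑ i ∈ T, h i := by
  have h1 : (∑ i ∈ S ∪ T, h i) = ∑ i ∈ S, h i := by
    refine (Finset.sum_subset Finset.subset_union_left ?_).symm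
    intro x hx hnx
    rcases Finset.mem_union.mp hx with h | h
    · exact absurd h hnx
    · exact hT x h hnx
  have h2 : (∑ i ∈ S ∪ T, h i) = ∑ i ∈ T, h i := by
    refine (Finset.sum_subset Finset.subset_union_right ?_).symm
    intro x hx hnx
    rcases Finset.mem_union.mp hx with h | h
    · exact hS x h hnx
    · exact absurd h hnx
  rw [← h1, h2]

theorem count_special_subsets_eq (n : Int) (arr : List Int) :
    count_special_subsets n arr = count_special_subsets_alt n arr := by
  rw [pvAEqSum,
    show count_special_subsets_alt n arr
      = ((PySem.List.sorted (arr.filter (fun x => decide (1 ≤ x ∧ x ≤ n))) (fun x => x) false).foldl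
          pvBStep (none, 0, 0, 0)).2.2.2 from rfl]
  set F : List Int := arr.filter (fun x => decide (1 ≤ x ∧ x ≤ n)) with hF
  have hmemF : ∀ x ∈ F, 1 ≤ x ∧ x ≤ n := by
    intro x hx; have := List.of_mem_filter hx; simpa using this
  have hperm : (PySem.List.sorted F (fun x => x) false).Perm F :=
    PySem.List.sorted_perm F (fun x => x) false
  have hsp : (PySem.List.sorted F (fun x => x) false).Pairwise (· ≤ ·) :=
    PySem.List.sorted_pairwise F (fun x => x)
  -- B's scan computes the sum over F of the count of each element's predecessor
  have hB : ((PySem.List.sorted F (fun x => x) false).foldl pvBStep (none, 0, 0, 0)).2.2.2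
      = (F.map (fun v => ((F.count (v - 1) : Nat) : Int))).sum := by
    have hmap : (PySem.List.sorted F (fun x => x) false).map
          (fun v => (((PySem.List.sorted F (fun x => x) false).count (v - 1) : Nat) : Int))
        = (PySem.List.sorted F (fun x => x) false).map (fun v => ((F.count (v - 1) : Nat) : Int)) := by
      apply List.map_congr_left
      intro w _
      rw [hperm.count_eq]
    rcases hl : (PySem.List.sorted F (fun x => x) false).getLast? with _ | m
    · have hne : PySem.List.sorted F (fun x => x) false = [] := List.getLast?_eq_none_iff.mp hl
      have hFe : F = [] := ((hne ▸ hperm)).symm.eq_nil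
      rw [hne, hFe]
      rfl
    · rw [pvBFold _ hsp m hl]
      show ((PySem.List.sorted F (fun x => x) false).map
          (fun v => (((PySem.List.sorted F (fun x => x) false).count (v - 1) : Nat) : Int))).sum = _
      rw [hmap]
      exact (hperm.map _).sum_eq
  rw [hB]
  set g : Int → Int := fun i => ((F.count i : Nat) : Int) * ((F.count (i + 1) : Nat) : Int)
    with hg
  have hnR : (PySem.List.pyRange 1 (n + 1) 1).Nodup := PySem.List.nodup_pyRange_one 1 (n + 1)
  rw [← List.sum_toFinset g hnR, Finset.sum_list_map_count]
  have hstep : ∀ m ∈ F.toFinset,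
      F.count m • ((F.count (m - 1) : Nat) : Int) = g (m - 1) := by
    intro m _
    show F.count m • ((F.count (m - 1) : Nat) : Int)
      = ((F.count (m - 1) : Nat) : Int) * ((F.count (m - 1 + 1) : Nat) : Int)
    rw [show m - 1 + 1 = m from by ring, nsmul_eq_mul]
    ring
  rw [Finset.sum_congr rfl hstep]
  have himg : (F.toFinset.image (fun m => m - 1)).sum g = F.toFinset.sum (fun m => g (m - 1)) :=
    Finset.sum_image (by intro x _ y _ h; simp only at h; omega)
  rw [← himg]
  apply pvSumEqOfVanish
  · intro i hiR hiT
    have hi1 : i + 1 ∉ F := by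
      intro hmem
      exact hiT (Finset.mem_image.mpr ⟨i + 1, List.mem_toFinset.mpr hmem, by ring⟩)
    have hc0 : F.count (i + 1) = 0 := List.count_eq_zero.mpr hi1
    simp [hc0]
  · intro i hiT hiR
    rcases Finset.mem_image.mp hiT with ⟨m, hm, rfl⟩
    have hmb := hmemF m (List.mem_toFinset.mp hm)
    have hiRb : (m - 1) ∉ PySem.List.pyRange 1 (n + 1) 1 := by
      intro h
      exact hiR (List.mem_toFinset.mpr h)
    have hlt : ¬ (1 ≤ m - 1 ∧ m - 1 < n + 1) := fun h => hiRb (PySem.List.mem_pyRange_one.mpr h)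
    have hc0 : F.count (m - 1) = 0 :=
      List.count_eq_zero.mpr (fun hc => by have := hmemF _ hc; omega)
    simp [hc0]

-- ===== VERDICT (by name: the statement is the Claim_ definition above) =====
theorem count_special_subsets_spec : Claim_equal_count_special_subsets := by
  intro n arr _
  exact count_special_subsets_eq n arr
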